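-- pv_equiv track=rewrite | github.com/lieuzhenghong/programming-practice | problems/pramp_busiest_time.py | find_busiest_period
-- ===== SOURCE A (Python) =====
-- def find_busiest_period(data):
--     last_timestamp = data[0][0]
--     peak_timestamp = data[0][0]
--     peak_visitors = 0
--     curr_visitors = 0
--     for (timestamp, number, io) in data:
--         # If timestamp == last_timestamp, then we append number to curr_visitors
--         # Otherwise, we set last_timestamp = timestamp and we set curr_visitors = number
--         # -number if io == 0, number otherwise
--         delta_visitors = number if io else -number
--         if timestamp == last_timestamp:
--             curr_visitors += delta_visitors
--         else:
--             if peak_visitors < curr_visitors: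
--                 peak_visitors = curr_visitors
--                 peak_timestamp = last_timestamp
--
--             last_timestamp = timestamp
--             curr_visitors += delta_visitors
--
--     if peak_visitors < curr_visitors:
--         peak_visitors = curr_visitors
--         peak_timestamp = last_timestamp
--
--     return peak_timestamp
-- ===== SOURCE B (Python) =====
-- def find_busiest_period(data):
--     # pass 1: running total of concurrent visitors after every event
--     totals = []
--     t = 0
--     for (_, n, io) in data:
--         t += n if io else -n
--         totals.append(t)
--     # pass 2: checkpoints (total, timestamp) at each consecutive-group end
--     ends = [(tot, ts)
--             for ((ts, _, _), tot), nxt in zip(zip(data, totals), data[1:] + [None])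
--             if nxt is None or nxt[0] != ts]
--     # pass 3: strict-< argmax (earliest checkpoint wins ties; 0/first-ts default)
--     best_tot, best_ts = 0, data[0][0]
--     for (tot, ts) in ends:
--         if best_tot < tot:
--             best_tot, best_ts = tot, ts
--     return best_ts
-- ===== Notes on version B (the rewrite author's own statement) =====
-- stated objective: alternative
-- what changed: B replaces A's single stateful scan (running last_timestamp, deferred peak check at each transition plus a trailing check) with three staged passes: a prefix-sum pass producing the running total after every event, a comprehension selecting (total, timestamp) checkpoints at each consecutive-group end (next event absent or differently timestamped), and a final strict-< argmax fold over those checkpoints.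
import Mathlib
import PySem

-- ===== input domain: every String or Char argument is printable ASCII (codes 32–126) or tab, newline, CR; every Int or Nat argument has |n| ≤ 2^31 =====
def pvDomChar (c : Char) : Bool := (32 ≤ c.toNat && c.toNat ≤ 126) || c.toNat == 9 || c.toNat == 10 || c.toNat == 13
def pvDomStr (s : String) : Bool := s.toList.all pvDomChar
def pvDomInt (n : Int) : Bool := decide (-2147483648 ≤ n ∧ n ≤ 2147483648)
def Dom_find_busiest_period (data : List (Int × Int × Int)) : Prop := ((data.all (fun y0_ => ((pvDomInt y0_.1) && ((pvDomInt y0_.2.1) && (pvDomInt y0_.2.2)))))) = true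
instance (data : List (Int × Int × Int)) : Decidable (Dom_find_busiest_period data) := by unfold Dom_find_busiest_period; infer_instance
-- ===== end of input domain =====

-- B replaces A's single stateful scan with three staged passes (prefix totals,
-- group-end checkpoints, strict-< argmax): an alternative decomposition, same
-- O(n) cost; return value only.

-- ===== PORT A =====
-- one step of A's for-loop; state = (last_timestamp, peak_timestamp, peak_visitors, curr_visitors)
def fbpStepA (st : Int × Int × Int × Int) (e : Int × Int × Int) : Int × Int × Int × Int :=
  let d := if e.2.2 ≠ 0 then e.2.1 else -e.2.1
  if e.1 = st.1 then (st.1, st.2.1, st.2.2.1, st.2.2.2 + d)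
  else if st.2.2.1 < st.2.2.2 then (e.1, st.1, st.2.2.2, st.2.2.2 + d)
  else (e.1, st.2.1, st.2.2.1, st.2.2.2 + d)

def find_busiest_period (data : List (Int × Int × Int)) : Int :=
  match data with
  | [] => 0  -- unreachable under Pre_ (Python raises IndexError on [])
  | (t0, _, _) :: _ =>
    let s := data.foldl fbpStepA (t0, t0, 0, 0)
    if s.2.2.1 < s.2.2.2 then s.1 else s.2.1

-- ===== PORT B =====
-- pass 1: running total of concurrent visitors after every event (t += d; append t)
def fbpTotals (t : Int) : List (Int × Int × Int) → List Int
  | [] => []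
  | e :: rest =>
      (t + (if e.2.2 ≠ 0 then e.2.1 else -e.2.1))
        :: fbpTotals (t + (if e.2.2 ≠ 0 then e.2.1 else -e.2.1)) rest

-- pass 2: Source B's comprehension over (event, total) paired with the NEXT event
-- (None at the end): keep (total, ts) where the next event is absent or has a
-- different timestamp.
def fbpEnds : List ((Int × Int × Int) × Int) → List (Int × Int)
  | [] => []
  | [(e, tot)] => [(tot, e.1)]
  | (e, tot) :: (e', tot') :: rest =>
      if e'.1 ≠ e.1 then (tot, e.1) :: fbpEnds ((e', tot') :: rest)
      else fbpEnds ((e', tot') :: rest)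

-- pass 3: one step of Source B's strict-< argmax loop
def fbpBest (b x : Int × Int) : Int × Int := if b.1 < x.1 then x else b

def find_busiest_period_alt (data : List (Int × Int × Int)) : Int :=
  match data with
  | [] => 0  -- unreachable under Pre_ (Python raises IndexError on [])
  | (t0, _, _) :: _ =>
      let totals := fbpTotals 0 data
      let ends := fbpEnds (data.zip totals)
      (ends.foldl fbpBest (0, t0)).2

-- ===== PRECONDITION & SPEC =====
-- Python A evaluates data[0][0]; on the empty list it raises IndexError, so [] is excluded.
def Pre_find_busiest_period (data : List (Int × Int × Int)) : Prop := data ≠ []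
instance (data : List (Int × Int × Int)) : Decidable (Pre_find_busiest_period data) := by
  unfold Pre_find_busiest_period; infer_instance
def pvWitness_find_busiest_period : (List (Int × Int × Int)) := [(1, 2, 1), (1, 1, 0), (3, 4, 1)]

def Spec_find_busiest_period (data : List (Int × Int × Int)) (out : Int) : Prop := out = find_busiest_period_alt data
instance (data : List (Int × Int × Int)) (out : Int) : Decidable (Spec_find_busiest_period data out) := by unfold Spec_find_busiest_period; infer_instance

-- ===== CLAIM (what is proved, stated in full; the proofs are below) =====
def Claim_equal_find_busiest_period : Prop := ∀ (data : List (Int × Int × Int)), Dom_find_busiest_period data → Pre_find_busiest_period data → Spec_find_busiest_period data (find_busiest_period data)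

-- ===== LEMMAS AND PROOFS =====

theorem foldDelta_shift (g : List (Int × Int × Int)) (a : Int) :
    g.foldl (fun acc e => acc + (if e.2.2 ≠ 0 then e.2.1 else -e.2.1)) a
      = a + g.foldl (fun acc e => acc + (if e.2.2 ≠ 0 then e.2.1 else -e.2.1)) 0 := by
  induction g generalizing a with
  | nil => simp
  | cons e g ih =>
      simp only [List.foldl_cons]
      rw [ih, ih (0 + (if e.2.2 ≠ 0 then e.2.1 else -e.2.1))]
      ring

-- signed-delta sum of a block
def fbpSum (l : List (Int × Int × Int)) : Int :=
  l.foldl (fun acc e => acc + (if e.2.2 ≠ 0 then e.2.1 else -e.2.1)) 0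

theorem fbpSum_cons (e : Int × Int × Int) (g : List (Int × Int × Int)) :
    fbpSum (e :: g) = (if e.2.2 ≠ 0 then e.2.1 else -e.2.1) + fbpSum g := by
  simp only [fbpSum, List.foldl_cons]
  rw [foldDelta_shift]
  ring

theorem fbpSum_cons' (t n io : Int) (g : List (Int × Int × Int)) :
    fbpSum ((t, n, io) :: g) = (if io ≠ 0 then n else -n) + fbpSum g := by
  simpa using fbpSum_cons (t, n, io) g

-- A's loop over a block of events whose timestamp equals the current
-- last_timestamp only accumulates curr_visitors.
theorem foldA_group (g : List (Int × Int × Int)) (last pT pV c : Int)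
    (hg : ∀ e ∈ g, e.1 = last) :
    g.foldl fbpStepA (last, pT, pV, c) = (last, pT, pV, c + fbpSum g) := by
  induction g generalizing c with
  | nil => simp [fbpSum]
  | cons e g ih =>
      have he : e.1 = last := hg e (List.mem_cons_self)
      have hg' : ∀ x ∈ g, x.1 = last := fun x hx => hg x (List.mem_cons_of_mem _ hx)
      have hstep : fbpStepA (last, pT, pV, c) e
          = (last, pT, pV, c + (if e.2.2 ≠ 0 then e.2.1 else -e.2.1)) := by
        simp [fbpStepA, he]
      simp only [List.foldl_cons, hstep, ih _ hg', fbpSum_cons]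
      have h2 : c + (if e.2.2 ≠ 0 then e.2.1 else -e.2.1) + fbpSum g
          = c + ((if e.2.2 ≠ 0 then e.2.1 else -e.2.1) + fbpSum g) := by ring
      rw [h2]

-- splitting the zipped (event, running-total) list at a block boundary
theorem zipTotals_append (xs ys : List (Int × Int × Int)) (c : Int) :
    (xs ++ ys).zip (fbpTotals c (xs ++ ys))
      = xs.zip (fbpTotals c xs) ++ ys.zip (fbpTotals (c + fbpSum xs) ys) := by
  induction xs generalizing c with
  | nil => simp [fbpSum]
  | cons e xs ih =>
      simp only [List.cons_append, fbpTotals, List.zip_cons_cons, ih, fbpSum_cons]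
      have h2 : c + (if e.2.2 ≠ 0 then e.2.1 else -e.2.1) + fbpSum xs
          = c + ((if e.2.2 ≠ 0 then e.2.1 else -e.2.1) + fbpSum xs) := by ring
      rw [h2]

theorem fbpEnds_cons_diff (e e' : Int × Int × Int) (tot tot' : Int)
    (rest : List ((Int × Int × Int) × Int)) (h : e'.1 ≠ e.1) :
    fbpEnds ((e, tot) :: (e', tot') :: rest) = (tot, e.1) :: fbpEnds ((e', tot') :: rest) := by
  simp [fbpEnds, h]

theorem fbpZipHeadFst (l1 : List (Int × Int × Int)) (l2 : List Int)
    (x : (Int × Int × Int) × Int) (h : (l1.zip l2).head? = some x) :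
    l1.head? = some x.1 := by
  cases l1 with
  | nil => simp at h
  | cons a as =>
      cases l2 with
      | nil => simp at h
      | cons b bs =>
          simp only [List.zip_cons_cons, List.head?_cons, Option.some.injEq] at h ⊢
          rw [← h]

theorem fbpEnds_cons_same (e e' : Int × Int × Int) (tot tot' : Int)
    (rest : List ((Int × Int × Int) × Int)) (h : e'.1 = e.1) :
    fbpEnds ((e, tot) :: (e', tot') :: rest) = fbpEnds ((e', tot') :: rest) := by
  simp [fbpEnds, h]

-- the checkpoints of a nonempty same-timestamp run followed by a different
-- timestamp (or nothing): exactly one checkpoint, at the run's cumulative total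
theorem fbpEnds_run (g : List (Int × Int × Int)) (t c : Int)
    (rest : List ((Int × Int × Int) × Int))
    (hne : g ≠ []) (hall : ∀ e ∈ g, e.1 = t)
    (hrest : ∀ x ∈ rest.head?, x.1.1 ≠ t) :
    fbpEnds (g.zip (fbpTotals c g) ++ rest) = (c + fbpSum g, t) :: fbpEnds rest := by
  induction g generalizing c with
  | nil => exact absurd rfl hne
  | cons e g ih =>
      have he : e.1 = t := hall e (List.mem_cons_self)
      match g with
      | [] =>
          simp only [fbpTotals, List.zip_cons_cons, List.zip_nil_left, List.nil_append,
            List.cons_append, List.nil_append]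
          match rest with
          | [] => simp [fbpEnds, fbpSum, he]
          | x :: rs =>
              have hx : x.1.1 ≠ t := hrest x (by simp)
              rcases x with ⟨xe, xt⟩
              have hne' : xe.1 ≠ e.1 := by rw [he]; exact hx
              rw [fbpEnds_cons_diff _ _ _ _ _ hne']
              simp [fbpSum, he]
      | e' :: g' =>
          have he' : e'.1 = t := hall e' (by simp)
          have hall' : ∀ x ∈ e' :: g', x.1 = t := fun x hx => hall x (List.mem_cons_of_mem _ hx)
          have h2 := ih (c + (if e.2.2 ≠ 0 then e.2.1 else -e.2.1)) (by simp) hall'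
          simp only [fbpTotals, List.zip_cons_cons, List.cons_append] at h2 ⊢
          rw [fbpEnds_cons_same e e' _ _ _ (by rw [he', he]), h2, fbpSum_cons e]
          have h3 : c + (if e.2.2 ≠ 0 then e.2.1 else -e.2.1) + fbpSum (e' :: g')
              = c + ((if e.2.2 ≠ 0 then e.2.1 else -e.2.1) + fbpSum (e' :: g')) := by ring
          rw [h3]

theorem fbpBest_eq (pV c last pT x1 x2 : Int) :
    fbpBest (if pV < c then (c, last) else (pV, pT)) (x1, x2)
      = if (if pV < c then c else pV) < x1 then (x1, x2)
        else ((if pV < c then c else pV), (if pV < c then last else pT)) := by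
  by_cases h : pV < c <;> simp [fbpBest, h]

-- Main invariant: starting A at a group boundary (head of r differs from last),
-- with the pending peak check on c applied to the seed, finishing A's loop
-- agrees with B's argmax fold over the remaining checkpoints.
theorem fbp_main (N : ℕ) : ∀ (r : List (Int × Int × Int)), r.length ≤ N →
    ∀ (last pT pV c : Int), (∀ e ∈ r.head?, e.1 ≠ last) →
    (let s := r.foldl fbpStepA (last, pT, pV, c);
      if s.2.2.1 < s.2.2.2 then s.1 else s.2.1) =
    ((fbpEnds (r.zip (fbpTotals c r))).foldl fbpBest
      (if pV < c then (c, last) else (pV, pT))).2 := by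
  induction N with
  | zero =>
      intro r hr last pT pV c _
      have hnil : r = [] := List.length_eq_zero_iff.mp (Nat.le_zero.mp hr)
      subst hnil
      simp only [List.zip_nil_left, List.foldl_nil, fbpEnds]
      split_ifs <;> rfl
  | succ N ih =>
      intro r hr last pT pV c hhead
      match r with
      | [] =>
          simp only [List.zip_nil_left, List.foldl_nil, fbpEnds]
          split_ifs <;> rfl
      | (t, n, io) :: rest =>
          have ht : t ≠ last := by
            have := hhead (t, n, io) (by simp)
            simpa using this
          have hsplit : rest = rest.takeWhile (fun e => e.1 == t) ++ rest.dropWhile (fun e => e.1 == t) :=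
            (List.takeWhile_append_dropWhile).symm
          set grpRest := rest.takeWhile (fun e => e.1 == t) with hgrp
          set rest' := rest.dropWhile (fun e => e.1 == t) with hrest'
          have hgrpAll : ∀ e ∈ grpRest, e.1 = t := by
            intro e heMem
            have := List.mem_takeWhile_imp heMem
            simpa using this
          have hgAll : ∀ e ∈ (t, n, io) :: grpRest, e.1 = t := by
            intro e heMem
            rcases List.mem_cons.mp heMem with h | h
            · simp [h]
            · exact hgrpAll e h
          have hrest'head : ∀ e ∈ rest'.head?, e.1 ≠ t := by
            intro e he
            have hd := List.head?_dropWhile_not (fun e => e.1 == t) rest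
            rw [← hrest'] at hd
            cases h : rest'.head? with
            | none => simp [h] at he
            | some x =>
                simp [h] at he hd
                subst he; exact hd
          have hlen : rest'.length ≤ N := by
            have h1 : rest'.length ≤ rest.length := List.length_dropWhile_le _ _
            have h2 : rest.length + 1 ≤ N + 1 := by simpa using hr
            omega
          set S := fbpSum ((t, n, io) :: grpRest) with hS
          -- A's side: consume the whole group
          have hstep : fbpStepA (last, pT, pV, c) (t, n, io) =
              (t, (if pV < c then last else pT), (if pV < c then c else pV),
                c + (if io ≠ 0 then n else -n)) := by
            simp only [fbpStepA]
            rw [if_neg ht]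
            split_ifs <;> rfl
          have hfoldA : ((t, n, io) :: rest).foldl fbpStepA (last, pT, pV, c) =
              rest'.foldl fbpStepA
                (t, (if pV < c then last else pT), (if pV < c then c else pV), c + S) := by
            conv_lhs => rw [List.foldl_cons, hstep, hsplit, List.foldl_append,
              foldA_group grpRest _ _ _ _ hgrpAll]
            have hc : c + (if io ≠ 0 then n else -n) + fbpSum grpRest = c + S := by
              rw [hS, fbpSum_cons']; ring
            rw [hc]
          -- B's side: the run contributes exactly one checkpoint (c + S, t)
          have hdataSplit : (t, n, io) :: rest = ((t, n, io) :: grpRest) ++ rest' := by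
            simp only [List.cons_append]
            rw [hgrp, hrest', List.takeWhile_append_dropWhile]
          have hends : fbpEnds (((t, n, io) :: rest).zip (fbpTotals c ((t, n, io) :: rest)))
              = (c + S, t) :: fbpEnds (rest'.zip (fbpTotals (c + S) rest')) := by
            conv_lhs => rw [hdataSplit]
            rw [zipTotals_append, ← hS]
            refine fbpEnds_run _ t c _ (by simp) hgAll ?_
            intro x hx
            have h1 : rest'.head? = some x.1 :=
              fbpZipHeadFst _ _ _ (Option.mem_def.mp hx)
            exact hrest'head x.1 (Option.mem_def.mpr h1)
          have hIH := ih rest' hlen t (if pV < c then last else pT) (if pV < c then c else pV)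
            (c + S) hrest'head
          rw [hfoldA, hends, List.foldl_cons, fbpBest_eq]
          rw [hIH]
  -- ===== (end of fbp_main) =====

-- ===== VERDICT (by name: the statement is the Claim_ definition above) =====
theorem find_busiest_period_spec : Claim_equal_find_busiest_period := by
  intro data _ hpre
  unfold Spec_find_busiest_period
  match data with
  | [] => exact absurd rfl hpre
  | (t0, n0, io0) :: tail =>
    show (let s := ((t0, n0, io0) :: tail).foldl fbpStepA (t0, t0, 0, 0);
        if s.2.2.1 < s.2.2.2 then s.1 else s.2.1)
      = (let totals := fbpTotals 0 ((t0, n0, io0) :: tail);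
         let ends := fbpEnds (((t0, n0, io0) :: tail).zip totals);
         (ends.foldl fbpBest (0, t0)).2)
    set grpRest := tail.takeWhile (fun e => e.1 == t0) with hgrp
    set rest' := tail.dropWhile (fun e => e.1 == t0) with hrest'
    have hsplitData : (t0, n0, io0) :: tail = ((t0, n0, io0) :: grpRest) ++ rest' := by
      simp only [List.cons_append]
      rw [hgrp, hrest', List.takeWhile_append_dropWhile]
    have hgrpAll : ∀ e ∈ grpRest, e.1 = t0 := by
      intro e he
      have := List.mem_takeWhile_imp he
      simpa using this
    have hgAll : ∀ e ∈ (t0, n0, io0) :: grpRest, e.1 = t0 := by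
      intro e he
      rcases List.mem_cons.mp he with h | h
      · simp [h]
      · exact hgrpAll e h
    have hrest'head : ∀ e ∈ rest'.head?, e.1 ≠ t0 := by
      intro e he
      have hd := List.head?_dropWhile_not (fun e => e.1 == t0) tail
      rw [← hrest'] at hd
      cases h : rest'.head? with
      | none => simp [h] at he
      | some x => simp [h] at he hd; subst he; exact hd
    set S := fbpSum ((t0, n0, io0) :: grpRest) with hS
    -- A consumes the leading run without any peak check
    have hfoldA : ((t0, n0, io0) :: tail).foldl fbpStepA (t0, t0, 0, 0) =
        rest'.foldl fbpStepA (t0, t0, 0, S) := by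
      conv_lhs => rw [hsplitData, List.foldl_append, foldA_group _ _ _ _ _ hgAll]
      rw [zero_add, ← hS]
    -- B's checkpoints: the leading run gives (S, t0)
    have hends : fbpEnds (((t0, n0, io0) :: tail).zip (fbpTotals 0 ((t0, n0, io0) :: tail)))
        = (S, t0) :: fbpEnds (rest'.zip (fbpTotals S rest')) := by
      conv_lhs => rw [hsplitData]
      rw [zipTotals_append, ← hS, zero_add]
      have hhd : ∀ x ∈ (rest'.zip (fbpTotals S rest')).head?, x.1.1 ≠ t0 := by
        intro x hx
        have h1 : rest'.head? = some x.1 :=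
          fbpZipHeadFst _ _ _ (Option.mem_def.mp hx)
        exact hrest'head x.1 (Option.mem_def.mpr h1)
      rw [fbpEnds_run ((t0, n0, io0) :: grpRest) t0 0 _ (by simp) hgAll hhd, ← hS, zero_add]
    have hmain := fbp_main rest'.length rest' le_rfl t0 t0 0 S hrest'head
    simp only []
    rw [hfoldA, hends, List.foldl_cons]
    rw [show fbpBest (0, t0) (S, t0) = (if (0:Int) < S then (S, t0) else ((0:Int), t0)) from by
      simp [fbpBest]]
    rw [hmain]
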